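-- pv_equiv track=rewrite | github.com/drexelwireless/iot-processing-framework | FusionFramework/v1/rfidutil.py | pointcrossings
-- ===== SOURCE A (Python) =====
-- def pointcrossings(data, threshold, direction='both'):
--     crossings = 0
--
--     for i in range(1, len(data)):
--         if data[i] > threshold and data[i-1] <= threshold:
--             if direction == 'both' or direction == 'up':
--                 crossings = crossings + 1
--
--         if data[i] <= threshold and data[i-1] > threshold:
--             if direction == 'both' or direction == 'down':
--                 crossings = crossings + 1
--
--     return crossings
-- ===== SOURCE B (Python) =====
-- def pointcrossings(data, threshold, direction='both'):
--     # Run-length compress the above/below-threshold state sequence, then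
--     # derive each directional count arithmetically: runs alternate, so the
--     # transitions split between up and down by parity of the initial state.
--     runs = []
--     for x in data:
--         b = x > threshold
--         if not runs or runs[-1] != b:
--             runs.append(b)
--     t = len(runs) - 1 if runs else 0
--     if direction == 'both':
--         return t
--     if direction == 'up':
--         return (t + (1 if runs and not runs[0] else 0)) // 2
--     if direction == 'down':
--         return (t + (1 if runs and runs[0] else 0)) // 2
--     return 0
-- ===== Notes on version B (the rewrite author's own statement) =====
-- stated objective: alternative
-- what changed: B run-length compresses the above/below-threshold state sequence and derives each directional count by a parity/closed-form calculation from the number of runs and the initial state, instead of A's per-pair branch-and-increment scan.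
import Mathlib
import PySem

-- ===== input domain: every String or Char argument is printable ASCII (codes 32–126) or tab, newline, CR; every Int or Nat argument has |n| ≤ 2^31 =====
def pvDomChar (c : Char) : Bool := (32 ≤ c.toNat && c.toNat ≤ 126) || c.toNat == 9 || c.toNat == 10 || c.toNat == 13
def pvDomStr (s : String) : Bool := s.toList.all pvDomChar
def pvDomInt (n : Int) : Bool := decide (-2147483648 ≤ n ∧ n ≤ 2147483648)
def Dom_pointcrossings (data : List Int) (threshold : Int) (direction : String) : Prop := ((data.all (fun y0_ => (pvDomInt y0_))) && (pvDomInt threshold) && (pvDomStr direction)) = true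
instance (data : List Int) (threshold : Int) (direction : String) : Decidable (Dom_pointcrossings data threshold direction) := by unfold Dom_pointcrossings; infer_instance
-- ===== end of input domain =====

-- B run-length compresses the above-threshold state sequence and derives each directional
-- count arithmetically from the run count and the initial state (alternative algorithm,
-- same O(n) cost).


-- ===== PORT A =====
def pointcrossings (data : List Int) (threshold : Int) (direction : String) : Int :=
  (PySem.List.pyRange 1 (data.length : Int) 1).foldl
    (fun crossings i =>
      let crossings :=
        if PySem.List.pyGetD data i 0 > threshold ∧ PySem.List.pyGetD data (i - 1) 0 ≤ threshold then
          (if direction = "both" ∨ direction = "up" then crossings + 1 else crossings)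
        else crossings
      if PySem.List.pyGetD data i 0 ≤ threshold ∧ PySem.List.pyGetD data (i - 1) 0 > threshold then
        (if direction = "both" ∨ direction = "down" then crossings + 1 else crossings)
      else crossings)
    0

-- ===== PORT B =====
-- B: run-length compress the above-threshold states, then closed-form per direction.
def pointcrossings_alt (data : List Int) (threshold : Int) (direction : String) : Int :=
  let runs := data.foldl
    (fun runs x =>
      let b := decide (x > threshold)
      if runs = ([] : List Bool) ∨ runs.getLast! ≠ b then runs ++ [b] else runs)
    ([] : List Bool)
  let t : Int := if runs ≠ [] then (runs.length : Int) - 1 else 0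
  if direction = "both" then t
  else if direction = "up" then
    PySem.Int.floordiv (t + (if runs ≠ [] ∧ runs.head! = false then 1 else 0)) 2
  else if direction = "down" then
    PySem.Int.floordiv (t + (if runs ≠ [] ∧ runs.head! = true then 1 else 0)) 2
  else 0

-- ===== PRECONDITION & SPEC =====
def Spec_pointcrossings (data : List Int) (threshold : Int) (direction : String) (out : Int) : Prop := out = pointcrossings_alt data threshold direction
instance (data : List Int) (threshold : Int) (direction : String) (out : Int) : Decidable (Spec_pointcrossings data threshold direction out) := by unfold Spec_pointcrossings; infer_instance

-- ===== CLAIM (what is proved, stated in full; the proofs are below) =====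
def Claim_equal_pointcrossings : Prop := ∀ (data : List Int) (threshold : Int) (direction : String), Dom_pointcrossings data threshold direction → Spec_pointcrossings data threshold direction (pointcrossings data threshold direction)

-- ===== LEMMAS AND PROOFS =====

-- A's per-index contribution, isolated from the accumulator.
def contribA (data : List Int) (threshold : Int) (direction : String) (i : Int) : Int :=
  (if PySem.List.pyGetD data i 0 > threshold ∧ PySem.List.pyGetD data (i - 1) 0 ≤ threshold then
     (if direction = "both" ∨ direction = "up" then (1 : Int) else 0)
   else 0)
  +
  (if PySem.List.pyGetD data i 0 ≤ threshold ∧ PySem.List.pyGetD data (i - 1) 0 > threshold then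
     (if direction = "both" ∨ direction = "down" then (1 : Int) else 0)
   else 0)

lemma pointcrossings_eq_sum (data : List Int) (threshold : Int) (direction : String) :
    pointcrossings data threshold direction
      = ((PySem.List.pyRange 1 (data.length : Int) 1).map (contribA data threshold direction)).sum := by
  unfold pointcrossings
  rw [show (fun (crossings : Int) (i : Int) =>
      let crossings :=
        if PySem.List.pyGetD data i 0 > threshold ∧ PySem.List.pyGetD data (i - 1) 0 ≤ threshold then
          (if direction = "both" ∨ direction = "up" then crossings + 1 else crossings)
        else crossings
      if PySem.List.pyGetD data i 0 ≤ threshold ∧ PySem.List.pyGetD data (i - 1) 0 > threshold then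
        (if direction = "both" ∨ direction = "down" then crossings + 1 else crossings)
      else crossings)
      = (fun (crossings : Int) (i : Int) => crossings + contribA data threshold direction i) from ?_,
    PySem.List.foldl_add, zero_add]
  funext c i
  simp only [contribA]
  split_ifs <;> omega

-- Up/down transition counts of a boolean state sequence from a given previous state.
def cnt (prev : Bool) : List Bool → Int × Int
  | [] => (0, 0)
  | b :: bs =>
    let r := cnt b bs
    (r.1 + (if b = true ∧ prev = false then 1 else 0),
     r.2 + (if prev = true ∧ b = false then 1 else 0))

-- A's sum equals the direction-weighted transition counts over the above-state list.
lemma sum_zip_eq_cnt (U D : Int) (prev : Bool) (bs : List Bool) :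
    (((prev :: bs).zip bs).map (fun pc : Bool × Bool =>
        if pc.2 = true ∧ pc.1 = false then U
        else if pc.1 = true ∧ pc.2 = false then D
        else 0)).sum
      = U * (cnt prev bs).1 + D * (cnt prev bs).2 := by
  induction bs generalizing prev with
  | nil => simp [cnt]
  | cons b bs ih =>
    simp only [List.zip_cons_cons, List.map_cons, List.sum_cons, ih b, cnt]
    cases prev <;> cases b <;> simp <;> ring

-- The transition counts differ by at most one, with direction fixed by the initial state.
lemma cnt_bound (bs : List Bool) (prev : Bool) :
    0 ≤ (cnt prev bs).1 ∧ 0 ≤ (cnt prev bs).2 ∧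
      (if prev then ((cnt prev bs).2 = (cnt prev bs).1 ∨ (cnt prev bs).2 = (cnt prev bs).1 + 1)
       else ((cnt prev bs).1 = (cnt prev bs).2 ∨ (cnt prev bs).1 = (cnt prev bs).2 + 1)) := by
  induction bs generalizing prev with
  | nil => simp [cnt]
  | cons b bs ih =>
    have h := ih b
    cases prev <;> cases b <;> simp [cnt] at h ⊢ <;> omega

-- Invariant of B's run-compression fold: head is preserved and the length grows by
-- exactly the number of transitions from the accumulator's last state.
lemma runs_inv (bs : List Bool) (acc : List Bool) (h : acc ≠ []) :
    (bs.foldl (fun runs b =>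
        if runs = ([] : List Bool) ∨ runs.getLast! ≠ b then runs ++ [b] else runs) acc) ≠ [] ∧
    (bs.foldl (fun runs b =>
        if runs = ([] : List Bool) ∨ runs.getLast! ≠ b then runs ++ [b] else runs) acc).head!
      = acc.head! ∧
    ((bs.foldl (fun runs b =>
        if runs = ([] : List Bool) ∨ runs.getLast! ≠ b then runs ++ [b] else runs) acc).length : Int)
      = (acc.length : Int) + (cnt acc.getLast! bs).1 + (cnt acc.getLast! bs).2 := by
  induction bs generalizing acc with
  | nil => simp [cnt, h]
  | cons b bs ih =>
    by_cases hb : acc.getLast! = b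
    · have hc : ¬(acc = ([] : List Bool) ∨ acc.getLast! ≠ b) := by
        simp only [List.getLast!_eq_getLast?_getD, Bool.default_bool] at hb ⊢
        simp [h, hb]
      have h2 := ih acc h
      simp only [List.foldl_cons, if_neg hc]
      refine ⟨h2.1, h2.2.1, ?_⟩
      have h3 := h2.2.2
      rw [hb] at h3 ⊢
      cases b <;> simp_all [cnt]
    · have hc : (acc = ([] : List Bool) ∨ acc.getLast! ≠ b) := Or.inr hb
      have h2 := ih (acc ++ [b]) (by simp)
      simp only [List.foldl_cons, if_pos hc]
      refine ⟨h2.1, ?_, ?_⟩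
      · rw [h2.2.1]
        cases acc with
        | nil => exact absurd rfl h
        | cons a as => simp
      · have h3 := h2.2.2
        have hl : (acc ++ [b]).getLast! = b := by
          simp [List.getLast!_eq_getLast?_getD]
        rw [hl] at h3
        rw [h3]
        cases hpb : acc.getLast! <;> cases b <;> simp_all [cnt] <;> omega

-- A equals the direction-weighted sum over adjacent pairs of the above-state list.
lemma A_eq_zip (data : List Int) (threshold : Int) (direction : String) :
    pointcrossings data threshold direction
      = (((data.map fun x => decide (x > threshold)).zip
            ((data.map fun x => decide (x > threshold)).drop 1)).map
          (fun pc : Bool × Bool =>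
            if pc.2 = true ∧ pc.1 = false then (if direction = "both" ∨ direction = "up" then (1 : Int) else 0)
            else if pc.1 = true ∧ pc.2 = false then (if direction = "both" ∨ direction = "down" then (1 : Int) else 0)
            else 0)).sum := by
  rw [pointcrossings_eq_sum]
  congr 1
  apply List.ext_getElem
  · simp [PySem.List.length_pyRange_one]
  · intro k h1 h2
    simp only [List.getElem_map, PySem.List.getElem_pyRange_one, List.getElem_zip,
      List.getElem_map, List.getElem_drop]
    have hk : k + 1 < data.length := by
      simp [PySem.List.length_pyRange_one] at h1; omega
    have e1 : PySem.List.pyGetD data (1 + (k : Int)) 0 = data[k + 1] := by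
      rw [show (1 + (k : Int)) = ((k + 1 : Nat) : Int) by omega]
      exact PySem.List.pyGetD_ofNat data (k+1) 0 hk
    have e2 : PySem.List.pyGetD data (1 + (k : Int) - 1) 0 = data[k] := by
      rw [show (1 + (k : Int) - 1) = ((k : Nat) : Int) by omega]
      exact PySem.List.pyGetD_ofNat data k 0 (by omega)
    simp only [show 1 + k = k + 1 from Nat.add_comm 1 k]
    simp only [contribA, e1, e2]
    by_cases h3 : data[k + 1] > threshold <;> by_cases h4 : data[k] > threshold <;>
      simp [h3, h4] <;> split_ifs <;> omega

-- ===== VERDICT (by name: the statement is the Claim_ definition above) =====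
theorem pointcrossings_spec : Claim_equal_pointcrossings := by
  intro data threshold direction _
  unfold Spec_pointcrossings pointcrossings_alt
  rw [A_eq_zip]
  have hfold : data.foldl
      (fun runs x =>
        let b := decide (x > threshold)
        if runs = ([] : List Bool) ∨ runs.getLast! ≠ b then runs ++ [b] else runs)
      ([] : List Bool)
      = (data.map fun x => decide (x > threshold)).foldl
          (fun runs b =>
            if runs = ([] : List Bool) ∨ runs.getLast! ≠ b then runs ++ [b] else runs)
          ([] : List Bool) := by
    rw [List.foldl_map]
  rw [hfold]
  cases hd : data.map (fun x => decide (x > threshold)) with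
  | nil =>
    simp only [List.drop_nil, List.zip_nil_right, List.map_nil, List.sum_nil, List.foldl_nil]
    have h0 : PySem.Int.floordiv 0 2 = 0 := by
      rw [PySem.Int.floordiv_eq_ediv_of_pos (by norm_num)]; norm_num
    split_ifs <;> simp_all
  | cons b0 bs =>
    simp only [List.foldl_cons, List.drop_succ_cons, List.drop_zero]
    have hinv := runs_inv bs [b0] (by simp)
    have hbnd := cnt_bound bs b0
    have hlast : ([b0] : List Bool).getLast! = b0 := by
      simp [List.getLast!_eq_getLast?_getD]
    rw [hlast] at hinv
    set runs := bs.foldl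
      (fun runs b =>
        if runs = ([] : List Bool) ∨ runs.getLast! ≠ b then runs ++ [b] else runs) [b0] with hruns
    clear_value runs
    obtain ⟨hne, hhead, hlen⟩ := hinv
    rw [sum_zip_eq_cnt]
    have hhd : runs.head! = b0 := by simpa using hhead
    simp only [List.length_cons, List.length_nil] at hlen
    simp only [PySem.Int.floordiv_eq_ediv_of_pos (show (0 : Int) < 2 by norm_num)]
    obtain ⟨hu, hd2, hth⟩ := hbnd
    by_cases h1 : direction = "both" <;> by_cases h2 : direction = "up" <;>
      by_cases h3 : direction = "down" <;>
      simp [h1, h2, h3] <;> cases hb0 : b0 <;> simp_all <;> omega
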